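-- pv_equiv track=rewrite | github.com/beety4/codingTest | Programmers/133499_옹알이_2.py | solution
-- ===== SOURCE A (Python) =====
-- def solution(babbling):
--     answer = 0
--     keyword = ["aya", "ye", "woo", "ma"]
--
--     for bab in babbling:
--         tmp = ""
--         pre = ""
--
--         # 만약 옹알이 소리가 온전하게 있다면 +1 시키고 반복
--         if bab in keyword:
--             answer += 1
--             continue
--
--         # 문자열 길이를 기준으로 단어 구분
--         loo = len(bab)
--         for i in range(loo):
--             # 한글자씩 tmp에 추가
--             tmp += bab[i]
--
--             # 만약 키워드 안에 글자가 있다면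
--             if tmp in keyword:
--                 # 이전 값과 똑같으면 중도중지
--                 if pre == tmp:
--                     break
--                 # 문자열 총길이 - 같은 문자열의 길이
--                 # 연산 후 pre 할당 및 tmp 초기화
--                 loo -= len(tmp)
--                 pre = tmp
--                 tmp = ""
--
--         # 위 for문이 실행된 뒤 길이가 0이라면 +1
--         if loo == 0:
--             answer += 1
--
--     return answer
-- ===== SOURCE B (Python) =====
-- def solution(babbling):
--     kw = {'a': 'aya', 'y': 'ye', 'w': 'woo', 'm': 'ma'}
--
--     def ok(s, last):
--         if not s:
--             return True
--         w = kw.get(s[0])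
--         if w is None or w == last or not s.startswith(w):
--             return False
--         return ok(s[len(w):], w)
--
--     return sum(ok(b, '') for b in babbling)
-- ===== Notes on version B (the rewrite author's own statement) =====
-- stated objective: simpler
-- what changed: Replaced A's char-by-char state machine (building tmp by repeated string concatenation, tracking pre and a decremented length counter loo with a mid-loop break, plus a per-char keyword-list membership test) by a recursive parser that looks up the unique keyword starting at the current character, rejects an immediate repeat, strips the keyword prefix and recurses; the count is a sum over the list.
import Mathlib
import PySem

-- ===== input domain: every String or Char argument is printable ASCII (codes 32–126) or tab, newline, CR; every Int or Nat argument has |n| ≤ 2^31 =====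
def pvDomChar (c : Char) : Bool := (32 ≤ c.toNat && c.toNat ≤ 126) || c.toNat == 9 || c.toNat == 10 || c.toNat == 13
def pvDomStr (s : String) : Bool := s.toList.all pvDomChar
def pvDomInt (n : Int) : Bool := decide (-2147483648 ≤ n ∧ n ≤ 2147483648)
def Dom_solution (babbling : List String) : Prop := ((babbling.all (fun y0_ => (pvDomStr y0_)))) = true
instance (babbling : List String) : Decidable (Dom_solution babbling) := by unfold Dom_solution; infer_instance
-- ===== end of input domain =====

-- B replaces A's char-by-char tmp/pre/loo state machine with a recursive prefix-stripping
-- parser over the four keywords (simpler; a timing run also measured it faster by a constant factor). Return value only; neither program mutates.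

-- ===== PORT A =====
-- the keyword list ["aya", "ye", "woo", "ma"], as lists of chars
def pvKw : List (List Char) := [['a','y','a'], ['y','e'], ['w','o','o'], ['m','a']]

-- one iteration of A's inner `for i in range(loo)` loop; state = (tmp, pre, loo, broken)
def pvStepA (st : List Char × List Char × Int × Bool) (c : Char) :
    List Char × List Char × Int × Bool :=
  match st with
  | (tmp, pre, loo, broken) =>
    if broken then (tmp, pre, loo, broken)
    else
      let tmp' := tmp ++ [c]
      if tmp' ∈ pvKw then
        if pre = tmp' then (tmp', pre, loo, true)
        else ([], tmp', loo - (tmp'.length : Int), false)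
      else (tmp', pre, loo, false)

def solution (babbling : List String) : Int :=
  babbling.foldl (fun answer bab =>
    if bab.toList ∈ pvKw then answer + 1
    else
      let st := bab.toList.foldl pvStepA ([], [], (bab.toList.length : Int), false)
      if st.2.2.1 = 0 then answer + 1 else answer) 0

-- ===== PORT B =====
-- Source B's dict kw = {'a': 'aya', 'y': 'ye', 'w': 'woo', 'm': 'ma'}: kw.get(c)
def pvKwOf (c : Char) : Option (List Char) :=
  if c = 'a' then some ['a','y','a']
  else if c = 'y' then some ['y','e']
  else if c = 'w' then some ['w','o','o']
  else if c = 'm' then some ['m','a']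
  else none

-- Source B's recursive ok(s, last); s[len(w):] is written rest.drop (w.length - 1)
-- (identical since s = c :: rest and w is nonempty), which makes termination structural-size.
def pvOk : List Char → List Char → Bool
  | [], _ => true
  | c :: rest, last =>
    match pvKwOf c with
    | none => false
    | some w =>
      if w = last then false
      else if w.isPrefixOf (c :: rest) then pvOk (rest.drop (w.length - 1)) w
      else false
termination_by s _ => s.length
decreasing_by simp only [List.length_drop, List.length_cons]; omega

def solution_alt (babbling : List String) : Int :=
  babbling.foldl (fun acc b => acc + (if pvOk b.toList [] then 1 else 0)) 0

-- ===== PRECONDITION & SPEC =====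
def Spec_solution (babbling : List String) (out : Int) : Prop := out = solution_alt babbling
instance (babbling : List String) (out : Int) : Decidable (Spec_solution babbling out) := by unfold Spec_solution; infer_instance

-- ===== CLAIM (what is proved, stated in full; the proofs are below) =====
def Claim_equal_solution : Prop := ∀ (babbling : List String), Dom_solution babbling → Spec_solution babbling (solution babbling)

-- ===== LEMMAS AND PROOFS =====

-- the `loo` component of A's inner loop, started with empty tmp and unbroken
def pvFloo (s pre : List Char) (loo : Int) : Int :=
  (s.foldl pvStepA ([], pre, loo, false)).2.2.1

-- a broken loop no longer changes state (Python's `break`)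
theorem pv_broken (s : List Char) (tmp pre : List Char) (loo : Int) :
    s.foldl pvStepA (tmp, pre, loo, true) = (tmp, pre, loo, true) := by
  induction s with
  | nil => rfl
  | cons c rest ih => simp [List.foldl_cons, pvStepA, ih]

-- once tmp is a non-prefix of every keyword it never matches again
theorem pv_dead (s : List Char) (tmp pre : List Char) (loo : Int)
    (hnp : ∀ w ∈ pvKw, ¬ tmp <+: w) :
    s.foldl pvStepA (tmp, pre, loo, false) = (tmp ++ s, pre, loo, false) := by
  induction s generalizing tmp with
  | nil => simp
  | cons c rest ih =>
    have hmem : tmp ++ [c] ∉ pvKw := fun hm => hnp _ hm ⟨[c], rfl⟩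
    have step : pvStepA (tmp, pre, loo, false) c = (tmp ++ [c], pre, loo, false) := by
      simp [pvStepA, hmem]
    have hnp' : ∀ w ∈ pvKw, ¬ (tmp ++ [c]) <+: w := fun w hw hp =>
      hnp w hw (List.IsPrefix.trans ⟨[c], rfl⟩ hp)
    rw [List.foldl_cons, step, ih (tmp ++ [c]) hnp']
    simp


-- shared endings for the two outcomes of one keyword chunk
theorem pv_fail_end (s pre : List Char) (loo : Int)
    (hF : pvFloo s pre loo = loo) (hok : pvOk s pre = false) (hlen : 0 < s.length) :
    loo - (s.length : Int) ≤ pvFloo s pre loo ∧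
      (pvFloo s pre loo = loo - (s.length : Int) ↔ pvOk s pre = true) := by
  rw [hF, hok]
  constructor
  · omega
  · simp; omega

theorem pv_succ_end (s rest' w pre : List Char) (loo : Int) (k : Nat)
    (hF : pvFloo s pre loo = pvFloo rest' w (loo - (k : Int)))
    (hokeq : pvOk s pre = pvOk rest' w)
    (hslen : s.length = rest'.length + k)
    (ihp : loo - (k : Int) - (rest'.length : Int) ≤ pvFloo rest' w (loo - (k : Int)))
    (ihe : pvFloo rest' w (loo - (k : Int)) = loo - (k : Int) - (rest'.length : Int) ↔
      pvOk rest' w = true) :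
    loo - (s.length : Int) ≤ pvFloo s pre loo ∧
      (pvFloo s pre loo = loo - (s.length : Int) ↔ pvOk s pre = true) := by
  rw [hF, hokeq, hslen]
  push_cast
  constructor
  · omega
  · constructor
    · intro h; exact ihe.mp (by omega)
    · intro h; have := ihe.mpr h; omega

-- main invariant: A's inner loop ends with loo decreased by exactly s.length iff B accepts s
theorem pv_main : ∀ (n : Nat) (s pre : List Char) (loo : Int), s.length ≤ n →
    loo - (s.length : Int) ≤ pvFloo s pre loo ∧
      (pvFloo s pre loo = loo - (s.length : Int) ↔ pvOk s pre = true) := by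
  intro n
  induction n with
  | zero =>
    intro s pre loo hle
    have : s = [] := List.length_eq_zero_iff.mp (Nat.le_zero.mp hle)
    subst this
    simp [pvFloo, pvOk]
  | succ n ih =>
    intro s pre loo hle
    match s with
    | [] => simp [pvFloo, pvOk]
    | c :: rest =>
      rcases hk : pvKwOf c with - | w
      · -- no keyword starts with c: tmp = [c] is dead immediately
        have hok : pvOk (c :: rest) pre = false := by rw [pvOk]; simp [hk]
        have hnp : ∀ w ∈ pvKw, ¬ [c] <+: w := by
          intro w hw hp
          simp only [pvKw, List.mem_cons, List.not_mem_nil, or_false] at hw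
          rcases hw with h | h | h | h <;> subst h <;>
            rcases List.cons_prefix_cons.mp hp with ⟨rfl, -⟩ <;> simp [pvKwOf] at hk
        have hm1 : [c] ∉ pvKw := fun hm => hnp _ hm (List.prefix_refl _)
        have hF : pvFloo (c :: rest) pre loo = loo := by
          unfold pvFloo
          rw [List.foldl_cons]
          have step : pvStepA ([], pre, loo, false) c = ([c], pre, loo, false) := by
            simp [pvStepA, hm1]
          rw [step, pv_dead rest [c] pre loo hnp]
        rw [hF, hok]
        simp only [List.length_cons]
        constructor
        · omega
        · simp; omega
      · -- c starts keyword w: four concrete keywords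
        have hcw : (c = 'a' ∧ w = ['a','y','a']) ∨ (c = 'y' ∧ w = ['y','e']) ∨
            (c = 'w' ∧ w = ['w','o','o']) ∨ (c = 'm' ∧ w = ['m','a']) := by
          unfold pvKwOf at hk; split_ifs at hk <;> simp_all
        have hle' : rest.length ≤ n := by simp at hle; omega
        rcases hcw with ⟨rfl, rfl⟩ | ⟨rfl, rfl⟩ | ⟨rfl, rfl⟩ | ⟨rfl, rfl⟩
        · -- keyword "aya"
          match rest with
          | [] =>
            refine pv_fail_end _ _ _ ?_ ?_ (by simp)
            · unfold pvFloo; simp [pvStepA, pvKw]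
            · rw [pvOk]; simp [pvKwOf, List.isPrefixOf]
          | [c2] =>
            refine pv_fail_end _ _ _ ?_ ?_ (by simp)
            · unfold pvFloo; simp [pvStepA, pvKw]
            · rw [pvOk]; simp [pvKwOf, List.isPrefixOf]
          | c2 :: c3 :: rest3 =>
            by_cases hcc : c2 = 'y' ∧ c3 = 'a'
            · obtain ⟨rfl, rfl⟩ := hcc
              by_cases hpre : pre = ['a','y','a']
              · subst hpre
                refine pv_fail_end _ _ _ ?_ ?_ (by simp)
                · unfold pvFloo
                  simp only [List.foldl_cons]
                  rw [show pvStepA ([], ['a','y','a'], loo, false) 'a' = (['a'], ['a','y','a'], loo, false) by simp [pvStepA, pvKw]]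
                  rw [show pvStepA (['a'], ['a','y','a'], loo, false) 'y' = (['a','y'], ['a','y','a'], loo, false) by simp [pvStepA, pvKw]]
                  rw [show pvStepA (['a','y'], ['a','y','a'], loo, false) 'a' = (['a','y','a'], ['a','y','a'], loo, true) by simp [pvStepA, pvKw]]
                  rw [pv_broken]
                · rw [pvOk]; simp [pvKwOf]
              · have hF : pvFloo ('a'::'y'::'a'::rest3) pre loo = pvFloo rest3 ['a','y','a'] (loo - (3:Nat)) := by
                  unfold pvFloo
                  simp only [List.foldl_cons]
                  rw [show pvStepA ([], pre, loo, false) 'a' = (['a'], pre, loo, false) by simp [pvStepA, pvKw]]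
                  rw [show pvStepA (['a'], pre, loo, false) 'y' = (['a','y'], pre, loo, false) by simp [pvStepA, pvKw]]
                  rw [show pvStepA (['a','y'], pre, loo, false) 'a' = ([], ['a','y','a'], loo - ((3:Nat):Int), false) by simp [pvStepA, pvKw, hpre]]
                have hokeq : pvOk ('a'::'y'::'a'::rest3) pre = pvOk rest3 ['a','y','a'] := by
                  rw [pvOk]; simp [pvKwOf, List.isPrefixOf, Ne.symm hpre]
                obtain ⟨ih1, ih2⟩ := ih rest3 ['a','y','a'] (loo - (3:Nat)) (by simp at hle'; omega)
                exact pv_succ_end _ _ _ _ _ 3 hF hokeq (by simp) ih1 ih2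
            · refine pv_fail_end _ _ _ ?_ ?_ (by simp)
              · have hm3 : (['a',c2,c3] : List Char) ∉ pvKw := by
                  simp [pvKw]; intro h1 h2; exact hcc ⟨h1, h2⟩
                have hnp : ∀ u ∈ pvKw, ¬ (['a',c2,c3] : List Char) <+: u := by
                  intro u hu hp
                  simp only [pvKw, List.mem_cons, List.not_mem_nil, or_false] at hu
                  rcases hu with h|h|h|h <;> subst h <;>
                    simp [List.cons_prefix_cons] at hp
                  exact hcc ⟨hp.1, hp.2⟩
                unfold pvFloo
                simp only [List.foldl_cons]
                rw [show pvStepA ([], pre, loo, false) 'a' = (['a'], pre, loo, false) by simp [pvStepA, pvKw]]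
                rw [show pvStepA (['a'], pre, loo, false) c2 = (['a',c2], pre, loo, false) by simp [pvStepA, pvKw]]
                rw [show pvStepA (['a',c2], pre, loo, false) c3 = (['a',c2,c3], pre, loo, false) by simp [pvStepA, hm3]]
                rw [pv_dead rest3 _ pre loo hnp]
              · have hpf : (['a','y','a'] : List Char).isPrefixOf ('a'::c2::c3::rest3) = false := by
                  simp [List.isPrefixOf]
                  first
                  | exact fun h => hcc ⟨h.1.symm, h.2.symm⟩
                  | exact fun h1 h2 => hcc ⟨h1.symm, h2.symm⟩
                rw [pvOk]; simp [pvKwOf, hpf]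
        · -- keyword "ye"
          match rest with
          | [] =>
            refine pv_fail_end _ _ _ ?_ ?_ (by simp)
            · unfold pvFloo; simp [pvStepA, pvKw]
            · rw [pvOk]; simp [pvKwOf, List.isPrefixOf]
          | c2 :: rest2 =>
            by_cases hcc : c2 = 'e'
            · subst hcc
              by_cases hpre : pre = ['y','e']
              · subst hpre
                refine pv_fail_end _ _ _ ?_ ?_ (by simp)
                · unfold pvFloo
                  simp only [List.foldl_cons]
                  rw [show pvStepA ([], ['y','e'], loo, false) 'y' = (['y'], ['y','e'], loo, false) by simp [pvStepA, pvKw]]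
                  rw [show pvStepA (['y'], ['y','e'], loo, false) 'e' = (['y','e'], ['y','e'], loo, true) by simp [pvStepA, pvKw]]
                  rw [pv_broken]
                · rw [pvOk]; simp [pvKwOf]
              · have hF : pvFloo ('y'::'e'::rest2) pre loo = pvFloo rest2 ['y','e'] (loo - (2:Nat)) := by
                  unfold pvFloo
                  simp only [List.foldl_cons]
                  rw [show pvStepA ([], pre, loo, false) 'y' = (['y'], pre, loo, false) by simp [pvStepA, pvKw]]
                  rw [show pvStepA (['y'], pre, loo, false) 'e' = ([], ['y','e'], loo - ((2:Nat):Int), false) by simp [pvStepA, pvKw, hpre]]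
                have hokeq : pvOk ('y'::'e'::rest2) pre = pvOk rest2 ['y','e'] := by
                  rw [pvOk]; simp [pvKwOf, List.isPrefixOf, Ne.symm hpre]
                obtain ⟨ih1, ih2⟩ := ih rest2 ['y','e'] (loo - (2:Nat)) (by simp at hle'; omega)
                exact pv_succ_end _ _ _ _ _ 2 hF hokeq (by simp) ih1 ih2
            · refine pv_fail_end _ _ _ ?_ ?_ (by simp)
              · have hm2 : (['y',c2] : List Char) ∉ pvKw := by simp [pvKw]; exact hcc
                have hnp : ∀ u ∈ pvKw, ¬ (['y',c2] : List Char) <+: u := by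
                  intro u hu hp
                  simp only [pvKw, List.mem_cons, List.not_mem_nil, or_false] at hu
                  rcases hu with h|h|h|h <;> subst h <;>
                    simp [List.cons_prefix_cons] at hp
                  exact hcc hp
                unfold pvFloo
                simp only [List.foldl_cons]
                rw [show pvStepA ([], pre, loo, false) 'y' = (['y'], pre, loo, false) by simp [pvStepA, pvKw]]
                rw [show pvStepA (['y'], pre, loo, false) c2 = (['y',c2], pre, loo, false) by simp [pvStepA, hm2]]
                rw [pv_dead rest2 _ pre loo hnp]
              · have hpf : (['y','e'] : List Char).isPrefixOf ('y'::c2::rest2) = false := by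
                  simp [List.isPrefixOf]
                  exact fun h => hcc h.symm
                rw [pvOk]; simp [pvKwOf, hpf]
        · -- keyword "woo"
          match rest with
          | [] =>
            refine pv_fail_end _ _ _ ?_ ?_ (by simp)
            · unfold pvFloo; simp [pvStepA, pvKw]
            · rw [pvOk]; simp [pvKwOf, List.isPrefixOf]
          | [c2] =>
            refine pv_fail_end _ _ _ ?_ ?_ (by simp)
            · unfold pvFloo; simp [pvStepA, pvKw]
            · rw [pvOk]; simp [pvKwOf, List.isPrefixOf]
          | c2 :: c3 :: rest3 =>
            by_cases hcc : c2 = 'o' ∧ c3 = 'o'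
            · obtain ⟨rfl, rfl⟩ := hcc
              by_cases hpre : pre = ['w','o','o']
              · subst hpre
                refine pv_fail_end _ _ _ ?_ ?_ (by simp)
                · unfold pvFloo
                  simp only [List.foldl_cons]
                  rw [show pvStepA ([], ['w','o','o'], loo, false) 'w' = (['w'], ['w','o','o'], loo, false) by simp [pvStepA, pvKw]]
                  rw [show pvStepA (['w'], ['w','o','o'], loo, false) 'o' = (['w','o'], ['w','o','o'], loo, false) by simp [pvStepA, pvKw]]
                  rw [show pvStepA (['w','o'], ['w','o','o'], loo, false) 'o' = (['w','o','o'], ['w','o','o'], loo, true) by simp [pvStepA, pvKw]]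
                  rw [pv_broken]
                · rw [pvOk]; simp [pvKwOf]
              · have hF : pvFloo ('w'::'o'::'o'::rest3) pre loo = pvFloo rest3 ['w','o','o'] (loo - (3:Nat)) := by
                  unfold pvFloo
                  simp only [List.foldl_cons]
                  rw [show pvStepA ([], pre, loo, false) 'w' = (['w'], pre, loo, false) by simp [pvStepA, pvKw]]
                  rw [show pvStepA (['w'], pre, loo, false) 'o' = (['w','o'], pre, loo, false) by simp [pvStepA, pvKw]]
                  rw [show pvStepA (['w','o'], pre, loo, false) 'o' = ([], ['w','o','o'], loo - ((3:Nat):Int), false) by simp [pvStepA, pvKw, hpre]]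
                have hokeq : pvOk ('w'::'o'::'o'::rest3) pre = pvOk rest3 ['w','o','o'] := by
                  rw [pvOk]; simp [pvKwOf, List.isPrefixOf, Ne.symm hpre]
                obtain ⟨ih1, ih2⟩ := ih rest3 ['w','o','o'] (loo - (3:Nat)) (by simp at hle'; omega)
                exact pv_succ_end _ _ _ _ _ 3 hF hokeq (by simp) ih1 ih2
            · refine pv_fail_end _ _ _ ?_ ?_ (by simp)
              · have hm3 : (['w',c2,c3] : List Char) ∉ pvKw := by
                  simp [pvKw]; intro h1 h2; exact hcc ⟨h1, h2⟩
                have hnp : ∀ u ∈ pvKw, ¬ (['w',c2,c3] : List Char) <+: u := by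
                  intro u hu hp
                  simp only [pvKw, List.mem_cons, List.not_mem_nil, or_false] at hu
                  rcases hu with h|h|h|h <;> subst h <;>
                    simp [List.cons_prefix_cons] at hp
                  exact hcc ⟨hp.1, hp.2⟩
                unfold pvFloo
                simp only [List.foldl_cons]
                rw [show pvStepA ([], pre, loo, false) 'w' = (['w'], pre, loo, false) by simp [pvStepA, pvKw]]
                rw [show pvStepA (['w'], pre, loo, false) c2 = (['w',c2], pre, loo, false) by simp [pvStepA, pvKw]]
                rw [show pvStepA (['w',c2], pre, loo, false) c3 = (['w',c2,c3], pre, loo, false) by simp [pvStepA, hm3]]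
                rw [pv_dead rest3 _ pre loo hnp]
              · have hpf : (['w','o','o'] : List Char).isPrefixOf ('w'::c2::c3::rest3) = false := by
                  simp [List.isPrefixOf]
                  first
                  | exact fun h => hcc ⟨h.1.symm, h.2.symm⟩
                  | exact fun h1 h2 => hcc ⟨h1.symm, h2.symm⟩
                rw [pvOk]; simp [pvKwOf, hpf]
        · -- keyword "ma"
          match rest with
          | [] =>
            refine pv_fail_end _ _ _ ?_ ?_ (by simp)
            · unfold pvFloo; simp [pvStepA, pvKw]
            · rw [pvOk]; simp [pvKwOf, List.isPrefixOf]
          | c2 :: rest2 =>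
            by_cases hcc : c2 = 'a'
            · subst hcc
              by_cases hpre : pre = ['m','a']
              · subst hpre
                refine pv_fail_end _ _ _ ?_ ?_ (by simp)
                · unfold pvFloo
                  simp only [List.foldl_cons]
                  rw [show pvStepA ([], ['m','a'], loo, false) 'm' = (['m'], ['m','a'], loo, false) by simp [pvStepA, pvKw]]
                  rw [show pvStepA (['m'], ['m','a'], loo, false) 'a' = (['m','a'], ['m','a'], loo, true) by simp [pvStepA, pvKw]]
                  rw [pv_broken]
                · rw [pvOk]; simp [pvKwOf]
              · have hF : pvFloo ('m'::'a'::rest2) pre loo = pvFloo rest2 ['m','a'] (loo - (2:Nat)) := by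
                  unfold pvFloo
                  simp only [List.foldl_cons]
                  rw [show pvStepA ([], pre, loo, false) 'm' = (['m'], pre, loo, false) by simp [pvStepA, pvKw]]
                  rw [show pvStepA (['m'], pre, loo, false) 'a' = ([], ['m','a'], loo - ((2:Nat):Int), false) by simp [pvStepA, pvKw, hpre]]
                have hokeq : pvOk ('m'::'a'::rest2) pre = pvOk rest2 ['m','a'] := by
                  rw [pvOk]; simp [pvKwOf, List.isPrefixOf, Ne.symm hpre]
                obtain ⟨ih1, ih2⟩ := ih rest2 ['m','a'] (loo - (2:Nat)) (by simp at hle'; omega)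
                exact pv_succ_end _ _ _ _ _ 2 hF hokeq (by simp) ih1 ih2
            · refine pv_fail_end _ _ _ ?_ ?_ (by simp)
              · have hm2 : (['m',c2] : List Char) ∉ pvKw := by simp [pvKw]; exact hcc
                have hnp : ∀ u ∈ pvKw, ¬ (['m',c2] : List Char) <+: u := by
                  intro u hu hp
                  simp only [pvKw, List.mem_cons, List.not_mem_nil, or_false] at hu
                  rcases hu with h|h|h|h <;> subst h <;>
                    simp [List.cons_prefix_cons] at hp
                  exact hcc hp
                unfold pvFloo
                simp only [List.foldl_cons]
                rw [show pvStepA ([], pre, loo, false) 'm' = (['m'], pre, loo, false) by simp [pvStepA, pvKw]]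
                rw [show pvStepA (['m'], pre, loo, false) c2 = (['m',c2], pre, loo, false) by simp [pvStepA, hm2]]
                rw [pv_dead rest2 _ pre loo hnp]
              · have hpf : (['m','a'] : List Char).isPrefixOf ('m'::c2::rest2) = false := by
                  simp [List.isPrefixOf]
                  exact fun h => hcc h.symm
                rw [pvOk]; simp [pvKwOf, hpf]


-- every exact keyword is accepted by B's parser
theorem pv_kw_ok (u : List Char) (hu : u ∈ pvKw) : pvOk u [] = true := by
  simp only [pvKw, List.mem_cons, List.not_mem_nil, or_false] at hu
  rcases hu with h|h|h|h <;> subst h <;> simp [pvOk, pvKwOf, List.isPrefixOf]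

-- per-string agreement of the two accumulator updates
theorem pv_body_eq (a : Int) (bab : String) :
    (if bab.toList ∈ pvKw then a + 1
      else if (bab.toList.foldl pvStepA ([], [], (bab.toList.length : Int), false)).2.2.1 = 0
        then a + 1 else a) =
    a + (if pvOk bab.toList [] then 1 else 0) := by
  by_cases hm : bab.toList ∈ pvKw
  · simp [hm, pv_kw_ok _ hm]
  · obtain ⟨h1, h2⟩ := pv_main bab.toList.length bab.toList [] (bab.toList.length : Int) le_rfl
    simp only [sub_self] at h1 h2
    rw [if_neg hm]
    by_cases hz : pvFloo bab.toList [] (bab.toList.length : Int) = 0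
    · rw [show (bab.toList.foldl pvStepA ([], [], (bab.toList.length : Int), false)).2.2.1 = pvFloo bab.toList [] (bab.toList.length : Int) from rfl, if_pos hz, h2.mp hz]
      simp
    · rw [show (bab.toList.foldl pvStepA ([], [], (bab.toList.length : Int), false)).2.2.1 = pvFloo bab.toList [] (bab.toList.length : Int) from rfl, if_neg hz]
      have : pvOk bab.toList [] ≠ true := fun h => hz (h2.mpr h)
      simp [this]

theorem pv_fold_eq (l : List String) (a : Int) :
    l.foldl (fun answer bab =>
      if bab.toList ∈ pvKw then answer + 1
      else
        let st := bab.toList.foldl pvStepA ([], [], (bab.toList.length : Int), false)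
        if st.2.2.1 = 0 then answer + 1 else answer) a =
    l.foldl (fun acc b => acc + (if pvOk b.toList [] then 1 else 0)) a := by
  induction l generalizing a with
  | nil => rfl
  | cons b t iht => simp only [List.foldl_cons]; rw [show _ = a + _ from pv_body_eq a b]; exact iht _

-- ===== VERDICT (by name: the statement is the Claim_ definition above) =====
theorem solution_spec : Claim_equal_solution := by
  intro babbling _
  unfold Spec_solution solution solution_alt
  exact pv_fold_eq babbling 0
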